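-- pv_equiv track=rewrite | github.com/Perruccio/advent-of-code | advent_of_code/year2023/day21/solution.py | count_reachable
-- ===== SOURCE A (Python) =====
-- from collections import deque
--
-- def count_reachable(grid, start, max_steps):
--     # convert to complex
--     # real part = colum, imag part = row (NB imag is pointing down)
--     # we can also filter out the rocks and treat them as holes
--     # in the grid
--     grid = {c + r*1j : p for r, row in enumerate(grid) for c, p in enumerate(row) if p != "#"}
--     # position, steps left
--     q = deque([(start[1] + start[0]*1j, max_steps)])
--     # NB we could use DFS, but with BFS we can make sure not to ever
--     # return to already visited points
--     # set of points already visited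
--     seen = set()
--     res = 0
--     while q:
--         pos, steps = q.popleft()
--         # skip if outside grid or already visited
--         if pos not in grid or pos in seen:
--             continue
--         # mark as visited
--         seen.add(pos)
--         # NB this position is reachable if steps is either 0 or even,
--         # because i could go back and forth.
--         # this trick allows us to avoid returning to already visited points
--         if steps % 2 == 0:
--             # NB we can just increment res by 1
--             # and not keep track of the set of end points
--             # thanks to 'seen'. Any end point already visited
--             # will be skipped
--             res += 1
--         if steps == 0:
--             continue
--         # move to neighbours
--         for delta in (1, -1, 1j, -1j):
--             q.append((pos + delta, steps - 1))
--     return res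
-- ===== SOURCE B (Python) =====
-- def count_reachable(grid, start, max_steps):
--     # breadth-first search by whole layers: frontier holds every cell at distance d from start
--     cells = {c + r*1j for r, row in enumerate(grid) for c, p in enumerate(row) if p != "#"}
--     pos = start[1] + start[0]*1j
--     frontier = [pos] if pos in cells else []
--     seen = set()
--     res = 0
--     d = 0
--     while frontier and d <= max_steps:
--         # a cell at distance d is an endpoint iff the leftover budget is even (walk back and forth)
--         if (max_steps - d) % 2 == 0:
--             res += len(frontier)
--         seen.update(frontier)
--         nxt = []
--         for p in frontier:
--             for n in (p + 1, p - 1, p + 1j, p - 1j):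
--                 if n in cells and n not in seen and n not in nxt:
--                     nxt.append(n)
--         frontier = nxt
--         d += 1
--     return res
-- ===== Notes on version B (the rewrite author's own statement) =====
-- stated objective: alternative
-- what changed: Replaces the per-node deque BFS that carries a steps-left budget in each queue entry (re-checking seen on pop and enqueueing duplicate/out-of-grid candidates) with a layered BFS that expands whole deduplicated frontiers level by level, counting len(frontier) for layers of matching parity and stopping once the depth exceeds max_steps.
-- intended difference: On a negative max_steps with start on a garden plot (and, when max_steps is odd, at least one plot neighbour), A's steps==0 stop never fires so it returns the parity-filtered size of the whole flooded component, while B returns 0 because no cell is reachable within a negative step budget, which is the intended reading of 'reachable in at most max_steps steps'. — e.g. on count_reachable(["."], (0, 0), -2): A returns 1, B returns 0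
import Mathlib
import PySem

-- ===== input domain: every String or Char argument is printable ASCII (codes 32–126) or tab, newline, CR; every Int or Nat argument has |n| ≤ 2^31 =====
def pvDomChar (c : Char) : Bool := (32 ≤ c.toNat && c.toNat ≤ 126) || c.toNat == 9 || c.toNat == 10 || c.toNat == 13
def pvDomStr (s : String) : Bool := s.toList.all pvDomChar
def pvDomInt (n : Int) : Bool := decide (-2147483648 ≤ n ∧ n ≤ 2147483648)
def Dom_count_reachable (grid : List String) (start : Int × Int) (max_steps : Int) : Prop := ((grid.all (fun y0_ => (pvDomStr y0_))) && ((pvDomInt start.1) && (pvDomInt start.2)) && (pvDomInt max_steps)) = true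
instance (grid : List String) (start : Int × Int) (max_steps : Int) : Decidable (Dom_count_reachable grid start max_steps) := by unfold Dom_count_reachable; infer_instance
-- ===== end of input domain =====

-- B replaces A's per-node deque BFS carrying a steps-left budget in every queue entry by a
-- layered BFS expanding whole deduplicated frontiers level by level (objective: alternative);
-- on a negative step budget B naturally returns 0 where A flood-fills (stated as D_ below).

-- ===== PORT A =====
-- positions are complex numbers re + im*1j, modelled as pairs (re, im)
def pvNbrs (p : Int × Int) : List (Int × Int) :=
  [(p.1 + 1, p.2), (p.1 - 1, p.2), (p.1, p.2 + 1), (p.1, p.2 - 1)]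

-- {c + r*1j : p for r, row in enumerate(grid) for c, p in enumerate(row) if p != "#"}
def pvGridA (grid : List String) : PySem.Dict (Int × Int) Char :=
  (PySem.List.enumerate grid).foldl (fun d rr =>
    (PySem.List.enumerate rr.2.toList).foldl (fun d cp =>
      if cp.2 ≠ '#' then d.insert (cp.1, rr.1) cp.2 else d) d) PySem.Dict.empty

def pvUnseenA (cells : PySem.Dict (Int × Int) Char) (seen : PySem.Set (Int × Int)) : Nat :=
  (cells.keys.filter (fun k => decide (k ∉ seen))).length

-- generic helper used only for the termination measures of the two loops
theorem pv_filter_le {α : Type} (l : List α) (p q : α → Bool)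
    (h : ∀ x ∈ l, q x = true → p x = true) :
    (l.filter q).length ≤ (l.filter p).length := by
  induction l with
  | nil => simp
  | cons a t ih =>
    have ht := ih (fun x hx => h x (List.mem_cons_of_mem _ hx))
    by_cases hq : q a = true
    · rw [List.filter_cons, List.filter_cons, if_pos hq, if_pos (h a (List.mem_cons_self) hq)]
      simpa using ht
    · rw [List.filter_cons, List.filter_cons, if_neg hq]
      split <;> simp <;> omega

theorem pv_filter_lt {α : Type} (l : List α) (p q : α → Bool)
    (h : ∀ x ∈ l, q x = true → p x = true)
    (x : α) (hx : x ∈ l) (hp : p x = true) (hq : q x = false) :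
    (l.filter q).length < (l.filter p).length := by
  induction l with
  | nil => simp at hx
  | cons a t ih =>
    have ht := pv_filter_le t p q (fun y hy => h y (List.mem_cons_of_mem _ hy))
    rcases List.mem_cons.1 hx with rfl | hx'
    · rw [List.filter_cons, List.filter_cons, if_pos hp, if_neg (by simp [hq])]
      simpa using Nat.lt_succ_of_le ht
    · have := ih (fun y hy => h y (List.mem_cons_of_mem _ hy)) hx'
      rw [List.filter_cons, List.filter_cons]
      have ha := h a (List.mem_cons_self)
      split <;> split <;> simp_all

-- the while-loop of A: queue of (position, steps-left), visited set, counter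
def pvLoopA (cells : PySem.Dict (Int × Int) Char) :
    List ((Int × Int) × Int) → PySem.Set (Int × Int) → Int → Int
  | [], _, res => res
  | (pos, steps) :: rest, seen, res =>
    if cells.contains pos = false ∨ pos ∈ seen then
      pvLoopA cells rest seen res
    else
      let seen' := PySem.Set.add seen pos
      let res' := if PySem.Int.mod steps 2 = 0 then res + 1 else res
      if steps = 0 then pvLoopA cells rest seen' res'
      else pvLoopA cells (rest ++ (pvNbrs pos).map (fun n => (n, steps - 1))) seen' res'
termination_by q seen _ => 5 * pvUnseenA cells seen + q.length
decreasing_by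
  all_goals try (simp; done)
  all_goals
    ( have hg : ¬(cells.contains pos = false ∨ pos ∈ seen) := by assumption
      rcases not_or.1 hg with ⟨hc, hnot⟩
      have hmem : pos ∈ cells.keys := (PySem.Dict.contains_iff_mem_keys _ _).1 (by simpa using hc)
      have hlt : pvUnseenA cells (PySem.Set.add seen pos) < pvUnseenA cells seen := by
        apply pv_filter_lt _ _ _ ?_ pos hmem (by simp [hnot]) (by simp [PySem.Set.mem_add])
        intro y _ hq
        simp only [decide_eq_true_eq] at hq ⊢
        intro hmem'
        exact hq ((PySem.Set.mem_add _ _ _).2 (Or.inl hmem'))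
      simp [pvNbrs]
      omega)

def count_reachable (grid : List String) (start : Int × Int) (max_steps : Int) : Int :=
  pvLoopA (pvGridA grid) [((start.2, start.1), max_steps)] PySem.Set.empty 0

-- ===== PORT B =====
-- {c + r*1j for r, row in enumerate(grid) for c, p in enumerate(row) if p != "#"}
def pvCellsB (grid : List String) : PySem.Set (Int × Int) :=
  (PySem.List.enumerate grid).foldl (fun s rr =>
    (PySem.List.enumerate rr.2.toList).foldl (fun s cp =>
      if cp.2 ≠ '#' then PySem.Set.add s (cp.1, rr.1) else s) s) PySem.Set.empty

-- the nested for-loops building nxt from frontier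
def pvNext (cells seen : PySem.Set (Int × Int)) (frontier : List (Int × Int)) : List (Int × Int) :=
  frontier.foldl (fun nxt pos =>
    (pvNbrs pos).foldl (fun nxt n =>
      if n ∈ cells ∧ n ∉ seen ∧ n ∉ nxt then nxt ++ [n] else nxt) nxt) []

-- needed by pvLoopB's termination measure
theorem pvNextAcc_sound (cells seen : PySem.Set (Int × Int)) (l : List (Int × Int)) :
    ∀ (acc : List (Int × Int)), (∀ x ∈ acc, x ∈ cells ∧ x ∉ seen) →
    ∀ x ∈ l.foldl (fun nxt n => if n ∈ cells ∧ n ∉ seen ∧ n ∉ nxt then nxt ++ [n] else nxt) acc,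
      x ∈ cells ∧ x ∉ seen := by
  induction l with
  | nil => intro acc h; simpa using h
  | cons a t ih =>
    intro acc h
    simp only [List.foldl_cons]
    split
    · apply ih
      intro x hx
      rcases List.mem_append.1 hx with h1 | h2
      · exact h x h1
      · simp only [List.mem_singleton] at h2
        subst h2
        constructor <;> tauto
    · exact ih _ h

theorem pvNextOuter_sound (cells seen : PySem.Set (Int × Int)) (frontier : List (Int × Int)) :
    ∀ (acc : List (Int × Int)), (∀ x ∈ acc, x ∈ cells ∧ x ∉ seen) →
    ∀ x ∈ frontier.foldl (fun nxt pos =>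
        (pvNbrs pos).foldl (fun nxt n =>
          if n ∈ cells ∧ n ∉ seen ∧ n ∉ nxt then nxt ++ [n] else nxt) nxt) acc,
      x ∈ cells ∧ x ∉ seen := by
  induction frontier with
  | nil => intro acc h; simpa using h
  | cons a t ih =>
    intro acc h
    simp only [List.foldl_cons]
    exact ih _ (pvNextAcc_sound cells seen _ acc h)

theorem pvNext_sound (cells seen : PySem.Set (Int × Int)) (frontier : List (Int × Int)) :
    ∀ x ∈ pvNext cells seen frontier, x ∈ cells ∧ x ∉ seen := by
  unfold pvNext
  exact pvNextOuter_sound cells seen frontier [] (by simp)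

def pvUnseenB (cells seen : PySem.Set (Int × Int)) : Nat :=
  (cells.filter (fun k => decide (k ∉ seen))).length

def pvFlagB (cells seen : PySem.Set (Int × Int)) (frontier : List (Int × Int)) : Nat :=
  if ∀ x ∈ frontier, x ∈ cells ∧ x ∉ seen then 0 else 1

-- the while-loop of B: frontier of the current layer, visited set, depth, counter
def pvLoopB (ms : Int) (cells : PySem.Set (Int × Int)) :
    List (Int × Int) → PySem.Set (Int × Int) → Int → Int → Int
  | frontier, seen, d, res =>
    if frontier = [] ∨ ¬(d ≤ ms) then res
    else
      let res' := if PySem.Int.mod (ms - d) 2 = 0 then res + (frontier.length : Int) else res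
      let seen' := PySem.Set.update seen frontier
      pvLoopB ms cells (pvNext cells seen' frontier) seen' (d + 1) res'
termination_by frontier seen _ _ => 2 * pvUnseenB cells seen + pvFlagB cells seen frontier
decreasing_by
  rename_i hguard
  rcases not_or.1 hguard with ⟨hne, _⟩
  have hflag' : pvFlagB cells (PySem.Set.update seen frontier) (pvNext cells (PySem.Set.update seen frontier) frontier) = 0 := by
    unfold pvFlagB
    rw [if_pos]
    exact pvNext_sound _ _ _
  by_cases hex : ∃ x ∈ frontier, x ∈ cells ∧ x ∉ seen
  · rcases hex with ⟨x, hxf, hxc, hxs⟩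
    have hlt : pvUnseenB cells (PySem.Set.update seen frontier) < pvUnseenB cells seen := by
      apply pv_filter_lt _ _ _ _ x hxc
      · simp [hxs]
      · simp [PySem.Set.mem_update, hxf]
      · intro y _ hq
        simp only [decide_eq_true_eq] at hq ⊢
        intro hmem'; exact hq ((PySem.Set.mem_update _ _ _).2 (Or.inl hmem'))
    rw [hflag']; unfold pvFlagB; split <;> omega
  · have hflag : pvFlagB cells seen frontier = 1 := by
      unfold pvFlagB
      rw [if_neg]
      intro hall
      rcases frontier with _ | ⟨a, t⟩
      · exact hne rfl
      · exact hex ⟨a, by simp, hall a (by simp)⟩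
    have heq : pvUnseenB cells (PySem.Set.update seen frontier) = pvUnseenB cells seen := by
      unfold pvUnseenB
      congr 1
      apply List.filter_congr
      intro k hk
      simp only [decide_eq_decide]
      constructor
      · intro h1 h2; exact h1 ((PySem.Set.mem_update _ _ _).2 (Or.inl h2))
      · intro h1 h2
        rcases (PySem.Set.mem_update _ _ _).1 h2 with h3 | h3
        · exact h1 h3
        · exact hex ⟨k, h3, hk, h1⟩
    rw [hflag', heq, hflag]; omega

def count_reachable_alt (grid : List String) (start : Int × Int) (max_steps : Int) : Int :=
  let cells := pvCellsB grid
  let pos0 := (start.2, start.1)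
  let frontier := if pos0 ∈ cells then [pos0] else []
  pvLoopB max_steps cells frontier PySem.Set.empty 0 0

-- ===== PRECONDITION & SPEC =====
-- 'grid[r][c] is a garden plot' as a direct closed-form test on the input (used only by D_)
def pvPlot (grid : List String) (r c : Int) : Bool :=
  decide (0 ≤ r) && decide (0 ≤ c) &&
    (match PySem.List.pyGet? grid r with
     | some row =>
       (match PySem.Str.pyGet? row c with
        | some ch => decide (ch ≠ '#')
        | none => false)
     | none => false)

-- On a negative max_steps with start on a plot (and, if max_steps is odd, some plot neighbour),
-- A returns the size of the whole flooded component filtered by parity (its steps==0 stop never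
-- fires, so the budget is ignored), while B returns 0 because no cell is reachable within a
-- negative budget — the intended reading of 'reachable in at most max_steps steps'.
def D_count_reachable (grid : List String) (start : Int × Int) (max_steps : Int) : Prop :=
  max_steps < 0 ∧ pvPlot grid start.1 start.2 = true ∧
    (PySem.Int.mod max_steps 2 = 0 ∨
      (pvPlot grid start.1 (start.2 + 1) = true ∨ pvPlot grid start.1 (start.2 - 1) = true ∨
       pvPlot grid (start.1 + 1) start.2 = true ∨ pvPlot grid (start.1 - 1) start.2 = true))
instance (grid : List String) (start : Int × Int) (max_steps : Int) : Decidable (D_count_reachable grid start max_steps) := by unfold D_count_reachable; infer_instance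

def Spec_count_reachable (grid : List String) (start : Int × Int) (max_steps : Int) (out : Int) : Prop := ¬ D_count_reachable grid start max_steps → out = count_reachable_alt grid start max_steps
instance (grid : List String) (start : Int × Int) (max_steps : Int) (out : Int) : Decidable (Spec_count_reachable grid start max_steps out) := by unfold Spec_count_reachable; infer_instance

def pvDiffWitness_count_reachable : List String × (Int × Int) × Int := (["."], (0, 0), -2)
def pvDiffWitnessOut_count_reachable : Int × Int := (1, 0)

-- ===== CLAIM (what is proved, stated in full; the proofs are below) =====
def Claim_unchanged_count_reachable : Prop := ∀ (grid : List String) (start : Int × Int) (max_steps : Int), Dom_count_reachable grid start max_steps → Spec_count_reachable grid start max_steps (count_reachable grid start max_steps)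
def Claim_changed_count_reachable : Prop := Dom_count_reachable (pvDiffWitness_count_reachable.1) (pvDiffWitness_count_reachable.2.1) (pvDiffWitness_count_reachable.2.2) ∧ D_count_reachable (pvDiffWitness_count_reachable.1) (pvDiffWitness_count_reachable.2.1) (pvDiffWitness_count_reachable.2.2) ∧ count_reachable (pvDiffWitness_count_reachable.1) (pvDiffWitness_count_reachable.2.1) (pvDiffWitness_count_reachable.2.2) = pvDiffWitnessOut_count_reachable.1 ∧ count_reachable_alt (pvDiffWitness_count_reachable.1) (pvDiffWitness_count_reachable.2.1) (pvDiffWitness_count_reachable.2.2) = pvDiffWitnessOut_count_reachable.2 ∧ pvDiffWitnessOut_count_reachable.1 ≠ pvDiffWitnessOut_count_reachable.2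
def Claim_exact_count_reachable : Prop := ∀ (grid : List String) (start : Int × Int) (max_steps : Int), Dom_count_reachable grid start max_steps → D_count_reachable grid start max_steps → count_reachable grid start max_steps ≠ count_reachable_alt grid start max_steps

-- ===== LEMMAS AND PROOFS =====

theorem pv_row_keys (r : Int) (row : List (Int × Char)) (d : PySem.Dict (Int × Int) Char)
    (s : PySem.Set (Int × Int)) (h : d.keys = s) :
    (row.foldl (fun d cp => if cp.2 ≠ '#' then d.insert (cp.1, r) cp.2 else d) d).keys
      = row.foldl (fun s cp => if cp.2 ≠ '#' then PySem.Set.add s (cp.1, r) else s) s := by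
  rw [PySem.List.foldl_ite_eq_foldl_filter, PySem.List.foldl_ite_eq_foldl_filter,
    PySem.Dict.keys_foldl_insert_key, h, PySem.Set.update_map_eq_foldl_add]

theorem pv_keys_eq_aux (L : List (Int × String)) :
    ∀ (d : PySem.Dict (Int × Int) Char) (s : PySem.Set (Int × Int)), d.keys = s →
    (L.foldl (fun d rr =>
      (PySem.List.enumerate rr.2.toList).foldl (fun d cp =>
        if cp.2 ≠ '#' then d.insert (cp.1, rr.1) cp.2 else d) d) d).keys
    = L.foldl (fun s rr =>
      (PySem.List.enumerate rr.2.toList).foldl (fun s cp =>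
        if cp.2 ≠ '#' then PySem.Set.add s (cp.1, rr.1) else s) s) s := by
  induction L with
  | nil => intro d s h; simpa using h
  | cons a t ih =>
    intro d s h
    simp only [List.foldl_cons]
    exact ih _ _ (pv_row_keys a.1 _ d s h)

theorem pv_keys_eq (grid : List String) : (pvGridA grid).keys = pvCellsB grid := by
  unfold pvGridA pvCellsB
  exact pv_keys_eq_aux _ PySem.Dict.empty PySem.Set.empty rfl

-- membership characterisation of the cell set: (c, r) ∈ cells ↔ grid[r][c] is a plot
theorem pv_mem_row_fold (r : Int) (l : List (Int × Char)) (s : PySem.Set (Int × Int))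
    (x : Int × Int) :
    x ∈ l.foldl (fun s cp => if cp.2 ≠ '#' then PySem.Set.add s (cp.1, r) else s) s ↔
      x ∈ s ∨ ∃ cp ∈ l, cp.2 ≠ '#' ∧ x = (cp.1, r) := by
  induction l generalizing s with
  | nil => simp
  | cons a t ih =>
    simp only [List.foldl_cons]
    by_cases ha : a.2 ≠ '#'
    · rw [if_pos ha, ih]
      simp only [PySem.Set.mem_add]
      constructor
      · rintro ((h | h) | ⟨cp, hcp, h1, h2⟩)
        · exact Or.inl h
        · exact Or.inr ⟨a, List.mem_cons_self, ha, h ▸ rfl⟩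
        · exact Or.inr ⟨cp, List.mem_cons_of_mem _ hcp, h1, h2⟩
      · rintro (h | ⟨cp, hcp, h1, h2⟩)
        · exact Or.inl (Or.inl h)
        · rcases List.mem_cons.1 hcp with rfl | hcp'
          · exact Or.inl (Or.inr (by rw [h2]))
          · exact Or.inr ⟨cp, hcp', h1, h2⟩
    · rw [if_neg ha, ih]
      constructor
      · rintro (h | ⟨cp, hcp, h1, h2⟩)
        · exact Or.inl h
        · exact Or.inr ⟨cp, List.mem_cons_of_mem _ hcp, h1, h2⟩
      · rintro (h | ⟨cp, hcp, h1, h2⟩)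
        · exact Or.inl h
        · rcases List.mem_cons.1 hcp with rfl | hcp'
          · exact absurd h1 ha
          · exact Or.inr ⟨cp, hcp', h1, h2⟩

theorem pv_mem_outer_fold (L : List (Int × String)) (s : PySem.Set (Int × Int))
    (x : Int × Int) :
    x ∈ L.foldl (fun s rr =>
        (PySem.List.enumerate rr.2.toList).foldl (fun s cp =>
          if cp.2 ≠ '#' then PySem.Set.add s (cp.1, rr.1) else s) s) s ↔
      x ∈ s ∨ ∃ rr ∈ L, ∃ cp ∈ PySem.List.enumerate rr.2.toList, cp.2 ≠ '#' ∧ x = (cp.1, rr.1) := by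
  induction L generalizing s with
  | nil => simp
  | cons a t ih =>
    simp only [List.foldl_cons]
    rw [ih, pv_mem_row_fold]
    constructor
    · rintro ((h | ⟨cp, hcp, h1, h2⟩) | ⟨rr, hrr, hrest⟩)
      · exact Or.inl h
      · exact Or.inr ⟨a, List.mem_cons_self, cp, hcp, h1, h2⟩
      · exact Or.inr ⟨rr, List.mem_cons_of_mem _ hrr, hrest⟩
    · rintro (h | ⟨rr, hrr, hrest⟩)
      · exact Or.inl (Or.inl h)
      · rcases List.mem_cons.1 hrr with rfl | hrr'
        · rcases hrest with ⟨cp, hcp, h1, h2⟩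
          exact Or.inl (Or.inr ⟨cp, hcp, h1, h2⟩)
        · exact Or.inr ⟨rr, hrr', hrest⟩

theorem pv_plot_iff (grid : List String) (r c : Int) :
    pvPlot grid r c = true ↔ (c, r) ∈ pvCellsB grid := by
  unfold pvPlot pvCellsB
  rw [pv_mem_outer_fold]
  constructor
  · intro h
    simp only [Bool.and_eq_true, decide_eq_true_eq] at h
    obtain ⟨⟨hr, hc⟩, hm⟩ := h
    rcases hrow : PySem.List.pyGet? grid r with _ | row
    · rw [hrow] at hm; simp only at hm; exact Bool.noConfusion hm
    rw [hrow] at hm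
    simp only at hm
    rcases hch : PySem.Str.pyGet? row c with _ | ch
    · rw [hch] at hm; simp only at hm; exact Bool.noConfusion hm
    rw [hch] at hm
    simp only [decide_eq_true_eq] at hm
    rw [PySem.List.pyGet?_of_nonneg grid hr] at hrow
    have hrl : r.toNat < grid.length := by
      by_contra hcon
      rw [List.getElem?_eq_none (by omega)] at hrow
      simp at hrow
    have hrv : grid[r.toNat] = row := by
      rw [List.getElem?_eq_getElem hrl] at hrow
      exact Option.some.inj hrow
    have hch' : row.toList[c.toNat]? = some ch := by
      have hnc := PySem.Str.pyGet?_natCast row c.toNat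
      rw [Int.toNat_of_nonneg hc] at hnc
      rw [← hnc]
      exact hch
    have hcl : c.toNat < row.toList.length := by
      by_contra hcon
      rw [List.getElem?_eq_none (by omega)] at hch'
      simp at hch'
    have hcv : row.toList[c.toNat] = ch := by
      rw [List.getElem?_eq_getElem hcl] at hch'
      exact Option.some.inj hch'
    right
    refine ⟨(r, row), ?_, (c, ch), ?_, hm, rfl⟩
    · rw [PySem.List.mem_enumerate_iff]
      exact ⟨r.toNat, hrl, by simp [hrv, Int.toNat_of_nonneg hr]⟩
    · rw [PySem.List.mem_enumerate_iff]
      exact ⟨c.toNat, hcl, by simp [hcv, Int.toNat_of_nonneg hc]⟩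
  · intro h
    rcases h with h | ⟨rr, hrr, cp, hcp, hne, hx⟩
    · simp [PySem.Set.empty] at h
    rw [PySem.List.mem_enumerate_iff] at hrr hcp
    obtain ⟨k, hk, hrr'⟩ := hrr
    obtain ⟨j, hj, hcp'⟩ := hcp
    have hc1 : c = cp.1 := congrArg Prod.fst hx
    have hr1 : r = rr.1 := congrArg Prod.snd hx
    have hr2 : r = (k : Int) := by rw [hr1, hrr']; simp
    have hc2 : c = (j : Int) := by rw [hc1, hcp']; simp
    have hrow : rr.2 = grid[k] := by rw [hrr']
    have hch : cp.2 = rr.2.toList[j] := by rw [hcp']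
    rw [hr2, hc2]
    have h1 : PySem.List.pyGet? grid ((k : Nat) : Int) = some grid[k] := by
      rw [PySem.List.pyGet?_natCast, List.getElem?_eq_getElem hk]
    have h2 : PySem.Str.pyGet? grid[k] ((j : Nat) : Int) = some rr.2.toList[j] := by
      rw [← hrow, PySem.Str.pyGet?_natCast, List.getElem?_eq_getElem hj]
    rw [h1]
    simp only [h2, decide_eq_true_eq, Bool.and_eq_true]
    refine ⟨⟨by positivity, by positivity⟩, ?_⟩
    rw [← hch]
    exact hne

-- Python's mod-2 is the Euclidean one (divisor 2 > 0)
theorem pv_mod2 (a : Int) : PySem.Int.mod a 2 = a % 2 :=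
  PySem.Int.mod_eq_emod_of_pos (by norm_num)

-- pvLoopA never decreases the counter
theorem pvLoopA_mono (cells : PySem.Dict (Int × Int) Char) :
    ∀ (q : List ((Int × Int) × Int)) (seen : PySem.Set (Int × Int)) (res : Int),
      res ≤ pvLoopA cells q seen res := by
  intro q seen res
  induction q, seen, res using pvLoopA.induct cells with
  | case1 seen res => rw [pvLoopA]
  | case2 pos steps rest seen res hg ih => rw [pvLoopA, if_pos hg]; exact ih
  | case3 pos rest seen res hg seen' res' ih =>
    rw [pvLoopA, if_neg hg]
    have hm0 : PySem.Int.mod (0 : Int) 2 = 0 := by rw [pv_mod2]; rfl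
    have hres' : res' = res + 1 := by
      have h : res' = if _ : PySem.Int.mod (0 : Int) 2 = 0 then res + 1 else res := rfl
      rw [h, dif_pos hm0]
    rw [hres'] at ih
    simp only [hm0, ↓reduceIte]
    exact le_trans (by omega) ih
  | case4 pos steps rest seen res hg seen' res' hz ih =>
    rw [pvLoopA, if_neg hg, if_neg hz]
    have hres' : res' = if PySem.Int.mod steps 2 = 0 then res + 1 else res := rfl
    rw [← hres']
    refine le_trans ?_ ih
    rw [hres']
    split <;> omega

-- if the queue holds an unvisited in-grid position whose steps budget is even (and the steps
-- parity of every queued entry is determined by its position), the counter strictly grows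
theorem pvLoopA_hits (cells : PySem.Dict (Int × Int) Char) (base : Int) :
    ∀ (q : List ((Int × Int) × Int)) (seen : PySem.Set (Int × Int)) (res : Int)
      (p : Int × Int),
      (∀ e ∈ q, PySem.Int.mod e.2 2 = PySem.Int.mod (base + e.1.1 + e.1.2) 2) →
      (∃ s, (p, s) ∈ q) → cells.contains p = true → p ∉ seen →
      PySem.Int.mod (base + p.1 + p.2) 2 = 0 →
      res + 1 ≤ pvLoopA cells q seen res := by
  intro q seen res
  induction q, seen, res using pvLoopA.induct cells with
  | case1 seen res =>
    intro p _ hex _ _ _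
    obtain ⟨s, hs⟩ := hex
    simp at hs
  | case2 pos steps rest seen res hg ih =>
    intro p hInv hex hc hns hpar
    obtain ⟨s, hs⟩ := hex
    have hne : p ≠ pos := by
      intro he
      subst he
      rcases hg with h1 | h2
      · rw [hc] at h1; exact Bool.noConfusion h1
      · exact hns h2
    have hrest : (p, s) ∈ rest := by
      rcases List.mem_cons.1 hs with he | h
      · exact absurd (congrArg Prod.fst he) hne
      · exact h
    rw [pvLoopA, if_pos hg]
    exact ih p (fun e he => hInv e (List.mem_cons_of_mem _ he)) ⟨s, hrest⟩ hc hns hpar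
  | case3 pos rest seen res hg seen' res' ih =>
    intro p hInv hex hc hns hpar
    rw [pvLoopA, if_neg hg]
    have hm0 : PySem.Int.mod (0 : Int) 2 = 0 := by rw [pv_mod2]; rfl
    have hres' : res' = res + 1 := by
      have h : res' = if _ : PySem.Int.mod (0 : Int) 2 = 0 then res + 1 else res := rfl
      rw [h, dif_pos hm0]
    simp only [hm0, ↓reduceIte]
    by_cases hpp : p = pos
    · subst hpp
      exact pvLoopA_mono _ _ _ _
    · obtain ⟨s, hs⟩ := hex
      have hrest : (p, s) ∈ rest := by
        rcases List.mem_cons.1 hs with he | h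
        · exact absurd (congrArg Prod.fst he) hpp
        · exact h
      have hns' : p ∉ PySem.Set.add seen pos := by
        intro h
        rcases (PySem.Set.mem_add _ _ _).1 h with h1 | h1
        · exact hns h1
        · exact hpp h1
      have h1 := ih p (fun e he => hInv e (List.mem_cons_of_mem _ he)) ⟨s, hrest⟩ hc hns' hpar
      rw [hres'] at h1
      exact le_trans (by omega) h1
  | case4 pos steps rest seen res hg seen' res' hz ih =>
    intro p hInv hex hc hns hpar
    rw [pvLoopA, if_neg hg, if_neg hz]
    have hres' : res' = if PySem.Int.mod steps 2 = 0 then res + 1 else res := rfl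
    by_cases hpp : p = pos
    · subst hpp
      have hst : PySem.Int.mod steps 2 = 0 := by
        have hh := hInv (p, steps) (List.mem_cons_self)
        exact hh.trans hpar
      rw [if_pos hst]
      exact pvLoopA_mono _ _ _ _
    · obtain ⟨s, hs⟩ := hex
      have hrest : (p, s) ∈ rest := by
        rcases List.mem_cons.1 hs with he | h
        · exact absurd (congrArg Prod.fst he) hpp
        · exact h
      have hns' : p ∉ PySem.Set.add seen pos := by
        intro h
        rcases (PySem.Set.mem_add _ _ _).1 h with h1 | h1
        · exact hns h1
        · exact hpp h1
      have hhead := hInv (pos, steps) (List.mem_cons_self)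
      have hInv' : ∀ e ∈ rest ++ (pvNbrs pos).map (fun n => (n, steps - 1)),
          PySem.Int.mod e.2 2 = PySem.Int.mod (base + e.1.1 + e.1.2) 2 := by
        intro e he
        rcases List.mem_append.1 he with h1 | h1
        · exact hInv e (List.mem_cons_of_mem _ h1)
        · simp only [pvNbrs, List.map_cons, List.map_nil] at h1
          simp only [pv_mod2] at hhead ⊢
          fin_cases h1 <;> simp <;> omega
      have h1 := ih p hInv' ⟨s, List.mem_append.2 (Or.inl hrest)⟩ hc hns' hpar
      rw [← hres']
      refine le_trans ?_ h1
      rw [hres']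
      split <;> omega

-- B's loop returns its accumulator at once on a negative budget
theorem pvLoopB_neg (ms : Int) (cells : PySem.Set (Int × Int)) (f : List (Int × Int))
    (seen : PySem.Set (Int × Int)) (res : Int) (h : ms < 0) :
    pvLoopB ms cells f seen 0 res = res := by
  rw [pvLoopB, if_pos (Or.inr (by omega))]

theorem pv_alt_neg (grid : List String) (start : Int × Int) (ms : Int) (h : ms < 0) :
    count_reachable_alt grid start ms = 0 := by
  unfold count_reachable_alt
  exact pvLoopB_neg _ _ _ _ _ h

-- A returns at least 1 on every input of D_ (start is processed; on an odd budget the plot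
-- neighbour is queued with an even budget and the bipartite parity of the grid walk keeps every
-- queue entry at that position even, so it is counted when first processed)
theorem pv_A_pos (grid : List String) (start : Int × Int) (ms : Int)
    (hD : D_count_reachable grid start ms) :
    1 ≤ count_reachable grid start ms := by
  obtain ⟨hms, hplot, hpar⟩ := hD
  have hc : (pvGridA grid).contains (start.2, start.1) = true := by
    rw [PySem.Dict.contains_iff_mem_keys, pv_keys_eq]
    exact (pv_plot_iff grid start.1 start.2).1 hplot
  have hg : ¬((pvGridA grid).contains (start.2, start.1) = false ∨
      (start.2, start.1) ∈ PySem.Set.empty) := by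
    simp [hc, PySem.Set.empty]
  unfold count_reachable
  rw [pvLoopA, if_neg hg, if_neg (by omega : ¬ ms = 0)]
  by_cases he : PySem.Int.mod ms 2 = 0
  · rw [if_pos he]
    have := pvLoopA_mono (pvGridA grid)
      ([] ++ (pvNbrs (start.2, start.1)).map (fun n => (n, ms - 1)))
      (PySem.Set.add PySem.Set.empty (start.2, start.1)) (0 + 1)
    omega
  · rw [if_neg he]
    rcases hpar with h0 | hnbr
    · exact absurd h0 he
    have hodd : ms % 2 = 1 := by
      rw [pv_mod2] at he
      omega
    -- the queue after processing start: the four neighbours with budget ms - 1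
    set q : List ((Int × Int) × Int) :=
      [] ++ (pvNbrs (start.2, start.1)).map (fun n => (n, ms - 1)) with hq
    set seen1 := PySem.Set.add PySem.Set.empty (start.2, start.1) with hseen1
    -- pick the plot neighbour
    have hpick : ∃ p : Int × Int, (∃ s, (p, s) ∈ q) ∧
        (pvGridA grid).contains p = true ∧ p ≠ (start.2, start.1) ∧
        (p.1 + p.2) % 2 = (start.2 + start.1 + 1) % 2 := by
      have hmemc : ∀ (r c : Int), pvPlot grid r c = true →
          (pvGridA grid).contains (c, r) = true := by
        intro r c h
        rw [PySem.Dict.contains_iff_mem_keys, pv_keys_eq]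
        exact (pv_plot_iff grid r c).1 h
      rcases hnbr with h | h | h | h
      · exact ⟨(start.2 + 1, start.1), ⟨ms - 1, by simp [hq, pvNbrs]⟩, hmemc _ _ h,
          by intro he'; have := congrArg Prod.fst he'; simp at this,
          by simp; omega⟩
      · exact ⟨(start.2 - 1, start.1), ⟨ms - 1, by simp [hq, pvNbrs]⟩, hmemc _ _ h,
          by intro he'; have := congrArg Prod.fst he'; simp at this,
          by simp; omega⟩
      · exact ⟨(start.2, start.1 + 1), ⟨ms - 1, by simp [hq, pvNbrs]⟩, hmemc _ _ h,
          by intro he'; have := congrArg Prod.snd he'; simp at this,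
          by simp; omega⟩
      · exact ⟨(start.2, start.1 - 1), ⟨ms - 1, by simp [hq, pvNbrs]⟩, hmemc _ _ h,
          by intro he'; have := congrArg Prod.snd he'; simp at this,
          by simp; omega⟩
    obtain ⟨p, hpq, hpc, hpne, hppar⟩ := hpick
    have hns : p ∉ seen1 := by
      intro h
      rcases (PySem.Set.mem_add _ _ _).1 h with h1 | h1
      · simp [PySem.Set.empty] at h1
      · exact hpne h1
    -- parity bookkeeping: base chosen so every queued entry satisfies the invariant
    have := pvLoopA_hits (pvGridA grid) (ms - 1 - (start.2 + start.1 + 1)) q seen1 0 p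
      (by
        intro e he
        simp only [hq, pvNbrs, List.nil_append, List.map_cons, List.map_nil] at he
        simp only [pv_mod2]
        fin_cases he <;> simp <;> omega)
      hpq hpc hns
      (by rw [pv_mod2]; omega)
    omega

-- unfolds A's loop completely on a negative odd budget with no plot neighbour: everything skips
theorem pv_A_neg_zero (grid : List String) (start : Int × Int) (ms : Int) (hms : ms < 0)
    (hnD : ¬ D_count_reachable grid start ms) :
    count_reachable grid start ms = 0 := by
  unfold count_reachable
  by_cases hplot : pvPlot grid start.1 start.2 = true
  · -- start is a plot: ¬D_ forces an odd budget and four non-plot neighbours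
    have hrest : ¬(PySem.Int.mod ms 2 = 0 ∨
        (pvPlot grid start.1 (start.2 + 1) = true ∨ pvPlot grid start.1 (start.2 - 1) = true ∨
         pvPlot grid (start.1 + 1) start.2 = true ∨ pvPlot grid (start.1 - 1) start.2 = true)) := by
      intro h
      exact hnD ⟨hms, hplot, h⟩
    have hodd : ¬ PySem.Int.mod ms 2 = 0 := fun h => hrest (Or.inl h)
    have h1 : ¬ pvPlot grid start.1 (start.2 + 1) = true := fun h => hrest (Or.inr (Or.inl h))
    have h2 : ¬ pvPlot grid start.1 (start.2 - 1) = true := fun h => hrest (Or.inr (Or.inr (Or.inl h)))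
    have h3 : ¬ pvPlot grid (start.1 + 1) start.2 = true := fun h => hrest (Or.inr (Or.inr (Or.inr (Or.inl h))))
    have h4 : ¬ pvPlot grid (start.1 - 1) start.2 = true := fun h => hrest (Or.inr (Or.inr (Or.inr (Or.inr h))))
    have hc : (pvGridA grid).contains (start.2, start.1) = true := by
      rw [PySem.Dict.contains_iff_mem_keys, pv_keys_eq]
      exact (pv_plot_iff grid start.1 start.2).1 hplot
    have hnc : ∀ (r c : Int), ¬ pvPlot grid r c = true →
        (pvGridA grid).contains (c, r) = false := by
      intro r c h
      rcases hcc : (pvGridA grid).contains (c, r) with _ | _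
      · rfl
      · exact absurd ((pv_plot_iff grid r c).2 (by
          rw [← pv_keys_eq]
          exact (PySem.Dict.contains_iff_mem_keys _ _).1 hcc)) h
    rw [pvLoopA, if_neg (by simp [hc, PySem.Set.empty]), if_neg hodd,
      if_neg (by omega : ¬ ms = 0)]
    simp only [List.nil_append, pvNbrs, List.map_cons, List.map_nil]
    rw [pvLoopA, if_pos (Or.inl (hnc _ _ (by simpa using h1)))]
    rw [pvLoopA, if_pos (Or.inl (hnc _ _ (by simpa using h2)))]
    rw [pvLoopA, if_pos (Or.inl (hnc _ _ (by simpa using h3)))]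
    rw [pvLoopA, if_pos (Or.inl (hnc _ _ (by simpa using h4)))]
    rw [pvLoopA]
  · -- start is not a plot: the single queue entry skips
    have hnc : (pvGridA grid).contains (start.2, start.1) = false := by
      rcases hcc : (pvGridA grid).contains (start.2, start.1) with _ | _
      · rfl
      · exact absurd ((pv_plot_iff grid start.1 start.2).2 (by
          rw [← pv_keys_eq]
          exact (PySem.Dict.contains_iff_mem_keys _ _).1 hcc)) hplot
    rw [pvLoopA, if_pos (Or.inl hnc)]
    rw [pvLoopA]

-- the ordered dedup-filter that one layer of A's queue processing performs
def pvG (cells : List (Int × Int)) (seen : PySem.Set (Int × Int)) :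
    List (Int × Int) → List (Int × Int)
  | [] => []
  | x :: l => if x ∈ cells ∧ x ∉ seen then x :: pvG cells (seen ++ [x]) l else pvG cells seen l

theorem pvG_sound (cells : List (Int × Int)) (l : List (Int × Int)) :
    ∀ (seen : PySem.Set (Int × Int)),
    (pvG cells seen l).Nodup ∧ ∀ x ∈ pvG cells seen l, x ∈ cells ∧ x ∉ seen := by
  induction l with
  | nil => intro seen; simp [pvG]
  | cons a t ih =>
    intro seen
    simp only [pvG]
    split
    · rename_i ha
      obtain ⟨nd, snd⟩ := ih (seen ++ [a])
      refine ⟨List.nodup_cons.2 ⟨fun hmem => ?_, nd⟩, ?_⟩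
      · have := (snd a hmem).2
        simp at this
      · intro x hx
        rcases List.mem_cons.1 hx with rfl | hx'
        · exact ha
        · have := snd x hx'
          refine ⟨this.1, fun hxs => this.2 ?_⟩
          simp [hxs]
    · exact ih seen

theorem pv_foldl_flatMap {α β : Type} (g : α → List α) (step : List β → α → List β) :
    ∀ (f : List α) (acc : List β),
    (f.flatMap g).foldl step acc = f.foldl (fun a x => (g x).foldl step a) acc := by
  intro f
  induction f with
  | nil => intro acc; simp
  | cons a t ih => intro acc; simp [List.foldl_append, ih]

theorem pv_gather_acc (cells seen : PySem.Set (Int × Int)) (l : List (Int × Int)) :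
    ∀ (acc : List (Int × Int)),
    l.foldl (fun nxt n => if n ∈ cells ∧ n ∉ seen ∧ n ∉ nxt then nxt ++ [n] else nxt) acc
      = acc ++ pvG cells (seen ++ acc) l := by
  induction l with
  | nil => intro acc; simp [pvG]
  | cons a t ih =>
    intro acc
    simp only [List.foldl_cons, pvG]
    by_cases ha : a ∈ cells ∧ a ∉ seen ∧ a ∉ acc
    · rw [if_pos ha, if_pos (by
        refine ⟨ha.1, fun hm => ?_⟩
        rcases List.mem_append.1 hm with h1 | h2
        · exact ha.2.1 h1
        · exact ha.2.2 (by simpa using h2)), ih (acc ++ [a])]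
      simp
    · rw [if_neg (fun hcon : a ∈ cells ∧ a ∉ seen ++ acc => by
        refine ha ⟨hcon.1, fun h1 => hcon.2 (List.mem_append.2 (Or.inl h1)),
          fun h2 => hcon.2 (List.mem_append.2 (Or.inr h2))⟩), if_neg ha, ih acc]

theorem pvNext_eq_pvG (cells seen : PySem.Set (Int × Int)) (f : List (Int × Int)) :
    pvNext cells seen f = pvG cells seen (f.flatMap pvNbrs) := by
  unfold pvNext
  rw [← pv_foldl_flatMap pvNbrs
    (fun nxt n => if n ∈ cells ∧ n ∉ seen ∧ n ∉ nxt then nxt ++ [n] else nxt) f []]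
  simpa using pv_gather_acc cells seen (f.flatMap pvNbrs) []

theorem pv_update_eq_append (f : List (Int × Int)) :
    ∀ (seen : PySem.Set (Int × Int)),
    (∀ x ∈ f, x ∉ seen) → f.Nodup → PySem.Set.update seen f = seen ++ f := by
  induction f with
  | nil => intro seen _ _; simp [PySem.Set.update]
  | cons a t ih =>
    intro seen h hnd
    have hnm : a ∉ seen := h a (List.mem_cons_self)
    have hadd : PySem.Set.add seen a = seen ++ [a] := by
      simp [PySem.Set.add, hnm]
    have hstep : PySem.Set.update seen (a :: t) = PySem.Set.update (seen ++ [a]) t := by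
      simp [PySem.Set.update, hadd]
    rw [hstep, ih]
    · simp
    · intro x hx
      have hne : x ≠ a := fun hxa => (List.nodup_cons.1 hnd).1 (hxa ▸ hx)
      simp [h x (List.mem_cons_of_mem _ hx), hne]
    · exact (List.nodup_cons.1 hnd).2

theorem pv_A_process (cellsD : PySem.Dict (Int × Int) Char) (s : Int) :
    ∀ (l : List (Int × Int)) (l2 : List ((Int × Int) × Int)) (seen : PySem.Set (Int × Int)) (res : Int),
    pvLoopA cellsD (l.map (fun p => (p, s)) ++ l2) seen res =
    pvLoopA cellsD
      (l2 ++ (if s = 0 then [] else (pvG cellsD.keys seen l).flatMap (fun p => (pvNbrs p).map (fun n => (n, s - 1)))))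
      (seen ++ pvG cellsD.keys seen l)
      (res + (if PySem.Int.mod s 2 = 0 then ((pvG cellsD.keys seen l).length : Int) else 0)) := by
  intro l
  induction l with
  | nil =>
    intro l2 seen res
    simp [pvG]
  | cons x t ih =>
    intro l2 seen res
    simp only [List.map_cons, List.cons_append, pvG]
    by_cases hx : x ∈ cellsD.keys ∧ x ∉ seen
    · have hcont : cellsD.contains x = true := (PySem.Dict.contains_iff_mem_keys _ _).2 hx.1
      have hguard : ¬(cellsD.contains x = false ∨ x ∈ seen) := by
        simp [hcont, hx.2]
      have hadd : PySem.Set.add seen x = seen ++ [x] := by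
        simp [PySem.Set.add, hx.2]
      rw [if_pos hx]
      by_cases hs : s = 0
      · subst hs
        rw [pvLoopA]
        simp only [if_neg hguard, hadd, ↓reduceIte]
        rw [ih l2 (seen ++ [x])]
        simp only [↓reduceIte, List.append_assoc, List.singleton_append]
        congr 1
        split <;> (push_cast [List.length_cons]; try omega)
      · rw [pvLoopA]
        simp only [if_neg hguard, if_neg hs, hadd]
        rw [List.append_assoc]
        rw [ih (l2 ++ (pvNbrs x).map fun n => (n, s - 1)) (seen ++ [x])]
        simp only [if_neg hs, List.append_assoc, List.flatMap_cons, List.singleton_append]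
        congr 1
        split <;> (push_cast [List.length_cons]; try omega)
    · have hguard : cellsD.contains x = false ∨ x ∈ seen := by
        by_cases hm : x ∈ seen
        · exact Or.inr hm
        · left
          rcases hc : cellsD.contains x with _ | _
          · rfl
          · exact absurd ⟨(PySem.Dict.contains_iff_mem_keys _ _).1 hc, hm⟩ hx
      rw [pvLoopA]
      simp only [if_pos hguard, if_neg hx]
      exact ih l2 seen res

theorem pv_main (cellsD : PySem.Dict (Int × Int) Char) (ms : Int) (hms : 0 ≤ ms) :
    ∀ (n : Nat) (seen : PySem.Set (Int × Int)) (raw : List (Int × Int)) (d res : Int),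
    pvUnseenA cellsD seen < n → 0 ≤ d →
    (pvG cellsD.keys seen raw ≠ [] → d ≤ ms) →
    pvLoopA cellsD (raw.map (fun p => (p, ms - d))) seen res =
    pvLoopB ms cellsD.keys (pvG cellsD.keys seen raw) seen d res := by
  intro n
  induction n with
  | zero => intro seen raw d res h; omega
  | succ n ih =>
    intro seen raw d res hn hd0 hdms
    have hA := pv_A_process cellsD (ms - d) raw [] seen res
    rw [List.append_nil] at hA
    set fg := pvG cellsD.keys seen raw with hfg
    obtain ⟨hfgnd, hfgsound⟩ := pvG_sound cellsD.keys raw seen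
    rw [← hfg] at hfgnd hfgsound
    by_cases hne : fg = []
    · rw [hne] at hA
      simp only [List.flatMap_nil, List.append_nil, List.length_nil,
        ite_self, Nat.cast_zero, add_zero] at hA
      rw [hA, hne]
      simp [pvLoopA, pvLoopB]
    · have hsub : ∀ x ∈ fg, x ∉ seen := fun x hx => (hfgsound x hx).2
      have hupd : PySem.Set.update seen fg = seen ++ fg := pv_update_eq_append fg seen hsub hfgnd
      have hguardB : ¬(fg = [] ∨ ¬(d ≤ ms)) := by
        simp [hne, hdms hne]
      have hres : res + (if PySem.Int.mod (ms - d) 2 = 0 then (fg.length : Int) else 0)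
          = (if PySem.Int.mod (ms - d) 2 = 0 then res + (fg.length : Int) else res) := by
        split <;> simp
      have hlt : pvUnseenA cellsD (seen ++ fg) < pvUnseenA cellsD seen := by
        rcases fg with _ | ⟨y, t⟩
        · exact absurd rfl hne
        · have hy := hfgsound y (List.mem_cons_self)
          apply pv_filter_lt _ _ _ ?_ y hy.1 (by simp [hy.2]) (by simp)
          intro k hk hq
          simp only [decide_eq_true_eq, List.mem_append] at hq ⊢
          intro hmem'
          exact hq (Or.inl hmem')
      rw [pvLoopB]
      simp only [if_neg hguardB]
      rw [hupd, pvNext_eq_pvG, hA, hres]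
      by_cases hs : ms - d = 0
      · rw [if_pos hs]
        have hnilA : ∀ (s2 : PySem.Set (Int × Int)) (r : Int), pvLoopA cellsD [] s2 r = r :=
          fun s2 r => by simp [pvLoopA]
        rw [List.nil_append, hnilA, pvLoopB]
        rw [if_pos (Or.inr (by omega : ¬ d + 1 ≤ ms))]
      · rw [if_neg hs]
        have hmap : (fg.flatMap (fun p => (pvNbrs p).map (fun n => (n, ms - d - 1))))
            = (fg.flatMap pvNbrs).map (fun p => (p, ms - (d + 1))) := by
          rw [List.map_flatMap]
          congr 1
          funext p
          congr 1
          funext q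
          congr 1
          ring
        rw [hmap]
        apply ih (seen ++ fg) (fg.flatMap pvNbrs) (d + 1) _ (by omega) (by omega)
        intro _
        have := hdms hne
        omega

-- ===== VERDICT (by name: the statements are the Claim_ definitions above) =====
theorem count_reachable_spec : Claim_unchanged_count_reachable := by
  unfold Claim_unchanged_count_reachable
  intro grid start ms _
  unfold Spec_count_reachable
  intro hnD
  by_cases hms : 0 ≤ ms
  · unfold count_reachable count_reachable_alt
    have h0 : [((start.2, start.1), ms)]
        = ([(start.2, start.1)].map (fun p => (p, ms - 0))) := by simp
    rw [h0, pv_main (pvGridA grid) ms hms (pvUnseenA (pvGridA grid) PySem.Set.empty + 1)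
      PySem.Set.empty [(start.2, start.1)] 0 0 (by omega) le_rfl (fun _ => hms)]
    rw [pv_keys_eq]
    congr 1
    simp [pvG]
  · rw [pv_A_neg_zero grid start ms (by omega) hnD, pv_alt_neg grid start ms (by omega)]

theorem count_reachable_tight : Claim_exact_count_reachable := by
  unfold Claim_exact_count_reachable
  intro grid start ms _ hD
  have h1 := pv_A_pos grid start ms hD
  have h2 := pv_alt_neg grid start ms hD.1
  omega

theorem count_reachable_changed : Claim_changed_count_reachable := by
  unfold Claim_changed_count_reachable
  refine ⟨by decide, ⟨by decide, by decide, by decide⟩, ?_, ?_⟩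
  · show count_reachable ["."] ((0 : Int), (0 : Int)) (-2) = 1
    simp only [count_reachable]
    rw [pvLoopA, if_neg (by decide), if_pos (by decide : PySem.Int.mod (-2 : Int) 2 = 0),
      if_neg (by decide : ¬ (-2 : Int) = 0)]
    simp only [List.nil_append, pvNbrs, List.map_cons, List.map_nil]
    rw [pvLoopA, if_pos (Or.inl (by decide))]
    rw [pvLoopA, if_pos (Or.inl (by decide))]
    rw [pvLoopA, if_pos (Or.inl (by decide))]
    rw [pvLoopA, if_pos (Or.inl (by decide))]
    rw [pvLoopA]
    norm_num
  · refine ⟨?_, by decide⟩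
    show count_reachable_alt ["."] ((0 : Int), (0 : Int)) (-2) = 0
    exact pv_alt_neg (["."]) ((0 : Int), (0 : Int)) (-2) (by omega)
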